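-- pv_equiv track=rewrite | github.com/MaxHermez/FTPSocketPy | server/server.py | _getBitNameLen
-- ===== SOURCE A (Python) =====
-- def _getBitNameLen(fn):
--     """get the length of the string in binary
--
--     Args:
--         fn (str): filename
--
--     Returns:
--         str/bool: binary string if successful or False if error occured
--     """
--     out = "{0:b}".format(len(fn))
--     if len(out) < 5:
--         for _ in range(5-len(out)):
--             out = "0" + out
--         return out
--     elif len(out) > 5:
--         return False
--     else:
--         return out
-- ===== SOURCE B (Python) =====
-- def _getBitNameLen(fn):
--     n = len(fn)
--     if n > 31:
--         return False
--     out = ""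
--     for i in range(4, -1, -1):
--         out += "1" if (n >> i) & 1 else "0"
--     return out
-- ===== Notes on version B (the rewrite author's own statement) =====
-- stated objective: alternative
-- what changed: B checks len(fn) > 31 up front and builds the fixed 5-character result by extracting each bit ((n >> i) & 1) from the high bit down, instead of formatting to a variable-width binary string and prepending zero characters in a padding loop.
import Mathlib
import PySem

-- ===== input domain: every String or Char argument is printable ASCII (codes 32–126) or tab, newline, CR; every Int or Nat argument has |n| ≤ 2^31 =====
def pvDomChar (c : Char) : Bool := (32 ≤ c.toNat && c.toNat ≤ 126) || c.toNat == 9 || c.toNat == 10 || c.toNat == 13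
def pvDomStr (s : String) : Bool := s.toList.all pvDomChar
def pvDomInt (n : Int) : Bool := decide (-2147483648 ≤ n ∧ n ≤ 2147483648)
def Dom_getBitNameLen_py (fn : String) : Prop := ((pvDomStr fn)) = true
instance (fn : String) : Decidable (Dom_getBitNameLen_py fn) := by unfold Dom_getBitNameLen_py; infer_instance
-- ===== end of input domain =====

-- B replaces format-then-pad with an up-front n>31 guard and fixed 5-bit extraction; objective: alternative decomposition.

-- ===== PORT A =====
-- "{0:b}".format(n): binary digits of n (hand-ported; exact for n : Nat, most significant first; "0" for n = 0)
def pyBinChars : Nat → List Char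
  | 0 => []
  | (n+1) => pyBinChars ((n+1)/2) ++ [if (n+1) % 2 = 1 then '1' else '0']
def pyBin (n : Nat) : List Char := if n = 0 then ['0'] else pyBinChars n
-- the padding loop: for _ in range(k): out = "0" + out
def padLoop : Nat → List Char → List Char
  | 0, out => out
  | (k+1), out => padLoop k ('0' :: out)

def getBitNameLen_py (fn : String) : Option String :=
  let out := pyBin fn.toList.length
  if out.length < 5 then some (String.ofList (padLoop (5 - out.length) out))
  else if out.length > 5 then none
  else some (String.ofList out)

-- ===== PORT B =====
def getBitNameLen_py_alt (fn : String) : Option String :=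
  let n := fn.toList.length
  if n > 31 then none
  else some (String.ofList ([4,3,2,1,0].foldl
    (fun acc i => acc ++ [if (n >>> i) &&& 1 = 1 then '1' else '0']) []))

-- ===== PRECONDITION & SPEC =====
def Spec_getBitNameLen_py (fn : String) (out : Option String) : Prop := out = getBitNameLen_py_alt fn
instance (fn : String) (out : Option String) : Decidable (Spec_getBitNameLen_py fn out) := by unfold Spec_getBitNameLen_py; infer_instance

-- ===== CLAIM (what is proved, stated in full; the proofs are below) =====
def Claim_equal_getBitNameLen_py : Prop := ∀ (fn : String), Dom_getBitNameLen_py fn → Spec_getBitNameLen_py fn (getBitNameLen_py fn)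

-- ===== LEMMAS AND PROOFS =====
-- 2^k ≤ n gives at least k+1 binary digits
theorem pyBinChars_len_ge (k : Nat) : ∀ n : Nat, 2 ^ k ≤ n → k + 1 ≤ (pyBinChars n).length := by
  induction k with
  | zero =>
    intro n h
    obtain ⟨m, rfl⟩ : ∃ m, n = m + 1 := ⟨n - 1, by omega⟩
    simp [pyBinChars]
  | succ k ih =>
    intro n h
    have hp : 0 < 2 ^ k := Nat.two_pow_pos k
    have he : 2 ^ (k+1) = 2 ^ k * 2 := by ring
    have h2 : 2 ^ k ≤ n / 2 := by omega
    obtain ⟨m, rfl⟩ : ∃ m, n = m + 1 := ⟨n - 1, by omega⟩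
    have := ih ((m+1)/2) h2
    simp [pyBinChars]
    omega

theorem core_eq (n : Nat) (hn : n ≤ 31) :
    (if (pyBin n).length < 5 then some (String.ofList (padLoop (5 - (pyBin n).length) (pyBin n)))
     else if (pyBin n).length > 5 then none
     else some (String.ofList (pyBin n))) =
    (if n > 31 then none
     else some (String.ofList ([4,3,2,1,0].foldl
       (fun acc i => acc ++ [if (n >>> i) &&& 1 = 1 then '1' else '0']) []))) := by
  interval_cases n <;> simp [pyBin, pyBinChars, padLoop, List.foldl]

-- ===== VERDICT (by name: the statement is the Claim_ definition above) =====
theorem getBitNameLen_py_spec : Claim_equal_getBitNameLen_py := by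
  intro fn _
  unfold Spec_getBitNameLen_py getBitNameLen_py getBitNameLen_py_alt
  generalize fn.toList.length = n
  by_cases h : n ≤ 31
  · exact core_eq n h
  · have h6 : 6 ≤ (pyBinChars n).length := pyBinChars_len_ge 5 n (by omega)
    have hz : n ≠ 0 := by omega
    simp only [pyBin, hz, if_false]
    rw [if_neg (by omega), if_pos (by omega), if_pos (by omega)]
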